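-- pv_equiv track=rewrite | github.com/jamesshancock/WindfarmLayoutOptimization | extras.py | generateBinaryStringsWithCopies
-- ===== SOURCE A (Python) =====
-- import itertools
--
-- def generateBinaryStringsWithCopies(n, k):
--     '''
--     Generates all binary strings of length n with exactly k 1s, 2s, and 3s
--
--     Parameters:
--     n (int): The length of the binary strings
--     k (int): The number of 1s, 2s, and 3s in the binary strings
--
--     Returns:
--     list: A list of binary strings with 1s, 2s, and 3s
--     '''
--     result = []
--     for positions in itertools.combinations(range(n), k):
--         for digit in ['3', '2', '1']:
--             binaryString = ['0'] * n
--             for pos in positions: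
--                 binaryString[pos] = digit
--             result.append(''.join(binaryString))
--     return result
-- ===== SOURCE B (Python) =====
-- def generateBinaryStringsWithCopies(n, k):
--     '''
--     Generates all binary strings of length n with exactly k 1s, 2s, and 3s.
--
--     Gap decomposition: placeholder patterns are produced recursively by
--     choosing the gap before each successive mark; the recursion runs over
--     whichever side (marks or zeros) is smaller, the zeros-side list being
--     reversed to restore lexicographic-by-mark-position order.  Each pattern
--     then yields one string per digit '3', '2', '1'.
--     '''
--     def pat(mark, fill, m, r):
--         # length-m strings with r marks, ordered lexicographically by mark positions
--         if r == 0: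
--             return [fill * m]
--         return [fill * g + mark + t
--                 for g in range(m - r + 1)
--                 for t in pat(mark, fill, m - g - 1, r - 1)]
--     if k == 0:
--         s = '0' * n
--         return [s, s, s]
--     if k > n:
--         return []
--     if 2 * k <= n:
--         pats = pat('X', '0', n, k)
--     else:
--         pats = pat('0', 'X', n, n - k)[::-1]
--     out = []
--     for p in pats:
--         for d in ['3', '2', '1']:
--             out.append(p.replace('X', d))
--     return out
-- ===== Notes on version B (the rewrite author's own statement) =====
-- stated objective: alternative
-- what changed: Replaced itertools.combinations plus per-combination ['0']*n buffer mutation by a recursive gap-decomposition pattern generator run over the smaller of marks/zeros (zeros-side list reversed to restore lexicographic order), with digits substituted by str.replace.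
import Mathlib
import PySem

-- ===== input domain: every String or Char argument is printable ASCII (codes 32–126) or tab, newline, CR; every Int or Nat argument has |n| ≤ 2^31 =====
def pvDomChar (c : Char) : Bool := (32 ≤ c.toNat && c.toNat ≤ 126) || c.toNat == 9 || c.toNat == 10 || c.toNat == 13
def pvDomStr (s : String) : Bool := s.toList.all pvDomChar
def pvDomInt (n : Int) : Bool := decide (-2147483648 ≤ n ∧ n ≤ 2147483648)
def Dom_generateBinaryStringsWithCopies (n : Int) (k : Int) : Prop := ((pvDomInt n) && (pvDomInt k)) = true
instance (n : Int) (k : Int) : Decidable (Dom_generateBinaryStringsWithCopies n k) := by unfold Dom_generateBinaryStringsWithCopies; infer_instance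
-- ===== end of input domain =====

-- B replaces the itertools.combinations loop and per-combination buffer mutation by a
-- recursive gap-decomposition pattern generator run over the smaller of marks/zeros
-- (zeros-side list reversed), the digit substituted into each pattern; objective: alternative.


-- ===== PORT A =====
-- itertools.combinations(xs, r): all r-element sublists, in itertools' lexicographic order.
def pyCombinations (xs : List Int) (r : Nat) : List (List Int) :=
  match r, xs with
  | 0, _ => [[]]
  | _ + 1, [] => []
  | r + 1, x :: rest => ((pyCombinations rest r).map (x :: ·)) ++ pyCombinations rest (r + 1)

-- binaryString[pos] = digit: every pos comes from range(n), so 0 ≤ pos < n and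
-- List.set pos.toNat is exact (Python's in-range list assignment).
def generateBinaryStringsWithCopies (n : Int) (k : Int) : List String :=
  (pyCombinations (PySem.List.pyRange 0 n 1) k.toNat).foldl
    (fun result positions =>
      (['3', '2', '1'] : List Char).foldl
        (fun result digit =>
          result ++ [String.ofList (positions.foldl
            (fun bs pos => bs.set pos.toNat digit) (List.replicate n.toNat '0'))])
        result)
    []

-- ===== PORT B =====
-- pat(mark, fill, m, r) of Source B.  The gap range 'range(m - r + 1)' is taken over Int
-- exactly as in Python (empty when m < r); g.toNat is exact since g ≥ 0.
def patC (mk fl : Char) (m r : Nat) : List (List Char) :=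
  if _hr : r = 0 then [List.replicate m fl]
  else (PySem.List.pyRange 0 ((m : Int) - (r : Int) + 1) 1).flatMap
        (fun g => (patC mk fl (m - g.toNat - 1) (r - 1)).map
          (fun t => List.replicate g.toNat fl ++ mk :: t))
termination_by r
decreasing_by omega

-- p.replace('X', d) with one-character old/new is exactly the character-wise map.
def generateBinaryStringsWithCopies_alt (n : Int) (k : Int) : List String :=
  if k = 0 then
    let s := String.ofList (List.replicate n.toNat '0')
    [s, s, s]
  else if n < k then []
  else
    (if 2 * k ≤ n then patC 'X' '0' n.toNat k.toNat
     else (patC '0' 'X' n.toNat (n - k).toNat).reverse).foldl (fun out p =>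
      (['3', '2', '1'] : List Char).foldl
        (fun out d => out ++ [String.ofList (p.map (fun c => if c = 'X' then d else c))])
        out)
      []

-- ===== PRECONDITION & SPEC =====
-- Python A raises ValueError (combinations with negative r) for k < 0; excluded.
def Pre_generateBinaryStringsWithCopies (n : Int) (k : Int) : Prop := 0 ≤ k
instance (n : Int) (k : Int) : Decidable (Pre_generateBinaryStringsWithCopies n k) := by unfold Pre_generateBinaryStringsWithCopies; infer_instance
def pvWitness_generateBinaryStringsWithCopies : Int × Int := (3, 2)

def Spec_generateBinaryStringsWithCopies (n : Int) (k : Int) (out : List String) : Prop := out = generateBinaryStringsWithCopies_alt n k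
instance (n : Int) (k : Int) (out : List String) : Decidable (Spec_generateBinaryStringsWithCopies n k out) := by unfold Spec_generateBinaryStringsWithCopies; infer_instance

-- ===== CLAIM (what is proved, stated in full; the proofs are below) =====
def Claim_equal_generateBinaryStringsWithCopies : Prop := ∀ (n : Int) (k : Int), Dom_generateBinaryStringsWithCopies n k → Pre_generateBinaryStringsWithCopies n k → Spec_generateBinaryStringsWithCopies n k (generateBinaryStringsWithCopies n k)

-- ===== LEMMAS AND PROOFS =====

-- the placeholder pattern a combination ps carves out of the index list xs
def maskOf (xs ps : List Int) : List Char := xs.map (fun x => if x ∈ ps then 'X' else '0')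

theorem pyCombinations_sublist : ∀ (xs : List Int) (r : Nat) (ps : List Int),
    ps ∈ pyCombinations xs r → ps.Sublist xs := by
  intro xs
  induction xs with
  | nil =>
    intro r ps h
    cases r with
    | zero => simp [pyCombinations] at h; simp [h]
    | succ r => simp [pyCombinations] at h
  | cons x rest ih =>
    intro r ps h
    cases r with
    | zero => simp [pyCombinations] at h; simp [h]
    | succ r =>
      simp only [pyCombinations, List.mem_append, List.mem_map] at h
      rcases h with ⟨qs, hqs, rfl⟩ | h
      · exact (ih r qs hqs).cons₂ x
      · exact (ih (r + 1) ps h).cons x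

theorem pyCombinations_nil_of_short : ∀ (xs : List Int) (r : Nat),
    xs.length < r → pyCombinations xs r = [] := by
  intro xs
  induction xs with
  | nil => intro r h; cases r with
    | zero => omega
    | succ r => simp [pyCombinations]
  | cons x rest ih =>
    intro r h
    cases r with
    | zero => simp at h
    | succ r =>
      simp only [List.length_cons] at h
      simp [pyCombinations, ih r (by omega), ih (r + 1) (by omega)]

theorem patC_nil_of_lt (mk fl : Char) (m r : Nat) (hr : r ≠ 0) (hm : m < r) :
    patC mk fl m r = [] := by
  rw [patC, dif_neg hr, PySem.List.pyRange_one_eq_nil (by omega)]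
  rfl

-- head-form of the gap recursion (for m ≥ 1)
theorem patC_head (mk fl : Char) (m r : Nat) (hm : 1 ≤ m) (hr : 1 ≤ r) :
    patC mk fl m r = ((patC mk fl (m - 1) (r - 1)).map (mk :: ·))
      ++ ((patC mk fl (m - 1) r).map (fl :: ·)) := by
  by_cases hlt : m < r
  · rw [patC_nil_of_lt mk fl m r (by omega) hlt,
        patC_nil_of_lt mk fl (m - 1) r (by omega) (by omega)]
    rcases Nat.eq_or_lt_of_le hr with h1 | h1
    · -- r = 1, m < 1: impossible
      omega
    · rw [patC_nil_of_lt mk fl (m - 1) (r - 1) (by omega) (by omega)]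
      simp
  · rw [patC, dif_neg (by omega)]
    rw [PySem.List.pyRange_one_cons (by omega)]
    rw [List.flatMap_cons]
    congr 1
    rw [patC, dif_neg (by omega), List.map_flatMap]
    simp only [zero_add]
    rw [PySem.List.pyRange_one 1 (↑m - ↑r + 1), PySem.List.pyRange_one 0 ((↑(m - 1) : Int) - ↑r + 1)]
    rw [List.flatMap_map, List.flatMap_map]
    have hbound : ((↑m - ↑r + 1 - 1 : Int)).toNat = ((↑(m - 1) : Int) - ↑r + 1 - 0).toNat := by
      push_cast [Nat.cast_sub hm]; omega
    rw [hbound]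
    congr 1
    funext j
    have h1 : ((1 : Int) + (j : Int)).toNat = j + 1 := by omega
    have h2 : ((0 : Int) + (j : Int)).toNat = j := by omega
    have h3 : m - (j + 1) - 1 = m - 1 - j - 1 := by omega
    simp only [h1, h2, h3, List.map_map, List.replicate_succ,
      List.cons_append, Function.comp_def]

-- order-reversing complement: the r-mark patterns in mark-lex order are the
-- (m-r)-mark patterns with roles swapped, in reverse order
theorem patC_compl : ∀ (m : Nat) (a b : Char) (r : Nat), r ≤ m →
    patC a b m r = (patC b a m (m - r)).reverse := by
  intro m
  induction m with
  | zero =>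
    intro a b r hr
    interval_cases r
    simp [patC]
  | succ m ih =>
    intro a b r hr
    cases r with
    | zero =>
      simp only [Nat.sub_zero]
      rw [patC_head b a (m + 1) (m + 1) (by omega) (by omega)]
      simp only [Nat.add_sub_cancel]
      rw [patC_nil_of_lt b a m (m + 1) (by omega) (by omega)]
      have hm : patC b a m m = (patC a b m 0).reverse := by
        have := ih b a m (le_refl m)
        simpa using this
      rw [hm, patC, dif_pos rfl, patC, dif_pos rfl]
      simp [List.replicate_succ]
    | succ r' =>
      rw [patC_head a b (m + 1) (r' + 1) (by omega) (by omega)]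
      simp only [Nat.add_sub_cancel]
      by_cases hsat : r' = m
      · subst hsat
        rw [patC_nil_of_lt a b r' (r' + 1) (by omega) (by omega)]
        rw [ih a b r' (le_refl r'), Nat.sub_self]
        rw [patC, dif_pos rfl]
        have h0 : r' + 1 - (r' + 1) = 0 := by omega
        rw [h0, patC, dif_pos rfl]
        simp [List.replicate_succ]
      · have hlt : r' + 1 ≤ m := by omega
        rw [ih a b r' (by omega), ih a b (r' + 1) hlt]
        have hsplit : m + 1 - (r' + 1) = (m - r' - 1) + 1 := by omega
        rw [hsplit]
        rw [patC_head b a (m + 1) ((m - r' - 1) + 1) (by omega) (by omega)]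
        simp only [Nat.add_sub_cancel]
        have e3 : m - r' - 1 + 1 = m - r' := by omega
        have e2 : m - r' - 1 = m - (r' + 1) := by omega
        rw [e3, e2, List.reverse_append, List.map_reverse, List.map_reverse]

theorem patC_eq_map_mask : ∀ (xs : List Int) (r : Nat), xs.Nodup →
    patC 'X' '0' xs.length r = (pyCombinations xs r).map (maskOf xs) := by
  intro xs
  induction xs with
  | nil =>
    intro r _
    cases r with
    | zero => simp [patC, pyCombinations, maskOf]
    | succ r =>
      rw [patC_nil_of_lt _ _ _ _ (by omega) (by simp)]
      simp [pyCombinations]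
  | cons x rest ih =>
    intro r hnd
    rcases List.nodup_cons.mp hnd with ⟨hx, hndr⟩
    cases r with
    | zero => simp [patC, pyCombinations, maskOf, List.replicate_succ]
    | succ r =>
      rw [show (x :: rest).length = rest.length + 1 from rfl]
      rw [patC_head 'X' '0' (rest.length + 1) (r + 1) (by omega) (by omega)]
      simp only [Nat.add_sub_cancel]
      rw [ih r hndr, ih (r + 1) hndr]
      rw [show pyCombinations (x :: rest) (r + 1)
          = ((pyCombinations rest r).map (x :: ·)) ++ pyCombinations rest (r + 1) from rfl]
      rw [List.map_append, List.map_map, List.map_map, List.map_map]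
      congr 1
      · apply List.map_congr_left
        intro ps hps
        simp only [Function.comp_apply, maskOf, List.map_cons]
        rw [if_pos (List.mem_cons_self)]
        congr 1
        apply List.map_congr_left
        intro y hy
        have hyx : y ≠ x := fun h => hx (h ▸ hy)
        simp [List.mem_cons, hyx]
      · apply List.map_congr_left
        intro ps hps
        have hxps : x ∉ ps := fun h =>
          hx ((pyCombinations_sublist rest (r + 1) ps hps).subset h)
        simp only [Function.comp_apply, maskOf, List.map_cons]
        rw [if_neg hxps]

theorem setfold_length (d : Char) : ∀ (ps : List Int) (init : List Char),
    (ps.foldl (fun bs pos => bs.set pos.toNat d) init).length = init.length := by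
  intro ps
  induction ps with
  | nil => intro init; rfl
  | cons p ps ih => intro init; rw [List.foldl_cons, ih, List.length_set]

theorem setfold_getElem? (d : Char) : ∀ (ps : List Int) (init : List Char) (j : Nat),
    (∀ p ∈ ps, 0 ≤ p ∧ p.toNat < init.length) → j < init.length →
    (ps.foldl (fun bs pos => bs.set pos.toNat d) init)[j]? =
      if (j : Int) ∈ ps then some d else init[j]? := by
  intro ps
  induction ps with
  | nil => intro init j _ _; simp
  | cons p ps ih =>
    intro init j hb hj
    rcases hb p List.mem_cons_self with ⟨hp0, hplt⟩
    rw [List.foldl_cons, ih (init.set p.toNat d) j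
        (fun q hq => by simpa using hb q (List.mem_cons_of_mem p hq))
        (by simpa using hj)]
    by_cases hmem : (j : Int) ∈ ps
    · simp [hmem, List.mem_cons]
    · rw [if_neg hmem]
      by_cases hjp : (j : Int) = p
      · have : p.toNat = j := by omega
        rw [if_pos (by simp [List.mem_cons, hjp])]
        rw [this, List.getElem?_set_self (by omega)]
      · have hne : p.toNat ≠ j := by omega
        rw [if_neg (by simp [List.mem_cons, hjp, hmem])]
        rw [List.getElem?_set_ne hne]

theorem build_eq_replaced (n : Int) (d : Char) (ps : List Int)
    (hps : ∀ p ∈ ps, 0 ≤ p ∧ p < n) :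
    ps.foldl (fun bs pos => bs.set pos.toNat d) (List.replicate n.toNat '0') =
      (maskOf (PySem.List.pyRange 0 n 1) ps).map (fun c => if c = 'X' then d else c) := by
  rw [PySem.List.pyRange_one]
  simp only [sub_zero]
  apply List.ext_getElem?
  intro j
  by_cases hj : j < n.toNat
  · rw [setfold_getElem? d ps (List.replicate n.toNat '0') j
        (fun p hp => ⟨(hps p hp).1, by have := hps p hp; simp; omega⟩)
        (by simpa using hj)]
    simp only [maskOf, List.map_map, List.getElem?_map, List.getElem?_range hj,
      Option.map_some, Function.comp_apply, zero_add]
    by_cases hmem : (j : Int) ∈ ps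
    · simp [hmem]
    · simp [hmem, hj]
  · rw [List.getElem?_eq_none (by rw [setfold_length]; simp; omega),
        List.getElem?_eq_none (by simp [maskOf]; omega)]

-- ===== VERDICT (by name: the statement is the Claim_ definition above) =====
theorem generateBinaryStringsWithCopies_spec : Claim_equal_generateBinaryStringsWithCopies := by
  intro n k _ hpre
  unfold Spec_generateBinaryStringsWithCopies
  unfold generateBinaryStringsWithCopies generateBinaryStringsWithCopies_alt
  by_cases hk0 : k = 0
  · subst hk0
    simp [pyCombinations]
  · rw [if_neg hk0]
    by_cases hkn : n < k
    · rw [if_pos hkn]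
      rw [pyCombinations_nil_of_short _ _
        (by rw [PySem.List.length_pyRange_one]; have : 0 < k := lt_of_le_of_ne hpre (Ne.symm hk0); omega)]
      rfl
    · rw [if_neg hkn]
      have hlen : (PySem.List.pyRange 0 n 1).length = n.toNat := by
        rw [PySem.List.length_pyRange_one]; simp
      have hnd := PySem.List.nodup_pyRange_one 0 n
      have hmask : patC 'X' '0' n.toNat k.toNat
          = (pyCombinations (PySem.List.pyRange 0 n 1) k.toNat).map
              (maskOf (PySem.List.pyRange 0 n 1)) := by
        have := patC_eq_map_mask (PySem.List.pyRange 0 n 1) k.toNat hnd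
        rwa [hlen] at this
      have hpats : (if 2 * k ≤ n then patC 'X' '0' n.toNat k.toNat
            else (patC '0' 'X' n.toNat (n - k).toNat).reverse)
          = patC 'X' '0' n.toNat k.toNat := by
        split_ifs with h2k
        · rfl
        · have hnk : (n - k).toNat = n.toNat - k.toNat := by omega
          have hC := patC_compl n.toNat 'X' '0' k.toNat (by omega)
          rw [hnk, ← hC]
      rw [hpats, hmask, List.foldl_map]
      apply PySem.List.foldl_congr_mem
      intro acc ps hps
      have hbound : ∀ p ∈ ps, 0 ≤ p ∧ p < n := by
        intro p hp
        have : p ∈ PySem.List.pyRange 0 n 1 :=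
          (pyCombinations_sublist _ _ ps hps).subset hp
        have := PySem.List.mem_pyRange_one.mp this
        omega
      simp only [List.foldl_cons, List.foldl_nil]
      rw [build_eq_replaced n '3' ps hbound, build_eq_replaced n '2' ps hbound,
          build_eq_replaced n '1' ps hbound]
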